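-- pv_equiv track=rewrite | github.com/1ELM7/L1SN_Tlse3_PaulSabatier | Pixal/Progresser/L1S2_Algo/TP 1 - Révisions CT L1S1 Info/CT dec 2020 (SN)/Somme 2 listes sans zéro/lesDeuxListes.py | lesDeuxListes
-- ===== SOURCE A (Python) =====
-- def lesDeuxListes(alpha,bravo):
--     charlie=[]
--     a,b=0,0
--     while a<len(alpha) and b<len(bravo):
--         if alpha[a]==0:
--             a+=1
--         elif bravo[b]==0:
--             b+=1
--         else:
--             charlie.append(alpha[a]+bravo[b])
--             a+=1
--             b+=1
--
--     while a<len(alpha):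
--         if alpha[a]!=0:
--             charlie.append(alpha[a])
--         a+=1
--     while b<len(bravo):
--         if bravo[b]!=0:
--             charlie.append(bravo[b])
--         b+=1
--     return charlie
-- ===== SOURCE B (Python) =====
-- def lesDeuxListes(alpha, bravo):
--     fa = [x for x in alpha if x != 0]
--     fb = [x for x in bravo if x != 0]
--     n = min(len(fa), len(fb))
--     return [x + y for x, y in zip(fa, fb)] + fa[n:] + fb[n:]
-- ===== Notes on version B (the rewrite author's own statement) =====
-- stated objective: simpler
-- what changed: Replaces the interleaved two-pointer zero-skipping while-loop (plus two leftover while-loops) with a filter-then-zip-then-tails decomposition.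
import Mathlib
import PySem

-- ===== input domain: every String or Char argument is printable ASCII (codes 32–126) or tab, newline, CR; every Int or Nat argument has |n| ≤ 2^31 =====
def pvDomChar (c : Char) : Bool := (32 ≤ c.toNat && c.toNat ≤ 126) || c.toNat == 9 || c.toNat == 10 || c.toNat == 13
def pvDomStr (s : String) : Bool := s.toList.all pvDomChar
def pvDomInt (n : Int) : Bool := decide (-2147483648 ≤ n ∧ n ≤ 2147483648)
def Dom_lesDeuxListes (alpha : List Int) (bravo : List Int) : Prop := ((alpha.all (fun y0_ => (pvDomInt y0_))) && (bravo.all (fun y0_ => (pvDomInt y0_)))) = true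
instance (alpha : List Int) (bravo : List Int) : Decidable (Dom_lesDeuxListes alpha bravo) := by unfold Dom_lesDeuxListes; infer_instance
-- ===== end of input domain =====

-- B replaces A's interleaved two-pointer zero-skipping scan by filter-then-zip-then-tails (simpler decomposition).


-- ===== PORT A =====
-- The first while loop: the two index pointers only move forward, so it is transcribed
-- as recursion on the two remaining suffixes, branches in A's order; returns (charlie, rest of alpha, rest of bravo).
def pvLoop1 : List Int → List Int → List Int → List Int × List Int × List Int
  | x :: as, y :: bs, charlie =>
      if x = 0 then pvLoop1 as (y :: bs) charlie
      else if y = 0 then pvLoop1 (x :: as) bs charlie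
      else pvLoop1 as bs (charlie ++ [x + y])
  | as, bs, charlie => (charlie, as, bs)

-- each leftover while loop: append the element if non-zero
def pvLoop2 (charlie : List Int) (rest : List Int) : List Int :=
  rest.foldl (fun c x => if x ≠ 0 then c ++ [x] else c) charlie

def lesDeuxListes (alpha : List Int) (bravo : List Int) : List Int :=
  let r := pvLoop1 alpha bravo []
  pvLoop2 (pvLoop2 r.1 r.2.1) r.2.2

-- ===== PORT B =====
def lesDeuxListes_alt (alpha : List Int) (bravo : List Int) : List Int :=
  let fa := alpha.filter (fun x => x != 0)
  let fb := bravo.filter (fun x => x != 0)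
  let n := min fa.length fb.length
  List.zipWith (· + ·) fa fb ++ fa.drop n ++ fb.drop n

-- ===== PRECONDITION & SPEC =====
def Spec_lesDeuxListes (alpha : List Int) (bravo : List Int) (out : List Int) : Prop := out = lesDeuxListes_alt alpha bravo
instance (alpha : List Int) (bravo : List Int) (out : List Int) : Decidable (Spec_lesDeuxListes alpha bravo out) := by unfold Spec_lesDeuxListes; infer_instance

-- ===== CLAIM (what is proved, stated in full; the proofs are below) =====
def Claim_equal_lesDeuxListes : Prop := ∀ (alpha : List Int) (bravo : List Int), Dom_lesDeuxListes alpha bravo → Spec_lesDeuxListes alpha bravo (lesDeuxListes alpha bravo)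

-- ===== LEMMAS AND PROOFS =====

theorem pvLoop2_eq_append_filter (rest charlie : List Int) :
    pvLoop2 charlie rest = charlie ++ rest.filter (fun x => x != 0) := by
  induction rest generalizing charlie with
  | nil => simp [pvLoop2]
  | cons x xs ih =>
      have h : pvLoop2 charlie (x :: xs) = pvLoop2 (if x ≠ 0 then charlie ++ [x] else charlie) xs := rfl
      rw [h, ih]
      by_cases hx : x = 0 <;> simp [hx]

-- closed form of B on already-filtered lists, used as the loop invariant target
def pvSpec (fa fb : List Int) : List Int :=
  List.zipWith (· + ·) fa fb ++ fa.drop (min fa.length fb.length) ++ fb.drop (min fa.length fb.length)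

theorem pvLoop1_invariant (as bs charlie : List Int) :
    (pvLoop2 (pvLoop2 (pvLoop1 as bs charlie).1 (pvLoop1 as bs charlie).2.1) (pvLoop1 as bs charlie).2.2)
      = charlie ++ pvSpec (as.filter (fun x => x != 0)) (bs.filter (fun x => x != 0)) := by
  induction as generalizing bs charlie with
  | nil =>
      simp [pvLoop1, pvLoop2_eq_append_filter, pvSpec]
  | cons x as ih =>
      cases bs with
      | nil =>
          simp [pvLoop1, pvLoop2_eq_append_filter, pvSpec]
      | cons y bs =>
          by_cases hx : x = 0
          · simpa [pvLoop1, hx] using ih (y :: bs) charlie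
          · by_cases hy : y = 0
            · -- inner loop skipping zeros of bravo: auxiliary induction on bs via recursion shape
              -- pvLoop1 (x::as) bs charlie ; reuse a nested induction
              have : ∀ bs' charlie',
                  (pvLoop2 (pvLoop2 (pvLoop1 (x :: as) bs' charlie').1 (pvLoop1 (x :: as) bs' charlie').2.1) (pvLoop1 (x :: as) bs' charlie').2.2)
                    = charlie' ++ pvSpec ((x :: as).filter (fun x => x != 0)) (bs'.filter (fun x => x != 0)) := by
                intro bs' charlie'
                induction bs' generalizing charlie' with
                | nil => simp [pvLoop1, pvLoop2_eq_append_filter, pvSpec, hx]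
                | cons y' bs' ihb =>
                    by_cases hy' : y' = 0
                    · simpa [pvLoop1, hx, hy'] using ihb charlie'
                    · have hstep := ih bs' (charlie' ++ [x + y'])
                      simp only [pvLoop1, if_neg hx, if_neg hy']
                      rw [hstep]
                      simp [pvSpec, hx, hy', Nat.succ_min_succ]
              simpa [pvLoop1, hx, hy] using this bs charlie
            · have hstep := ih bs (charlie ++ [x + y])
              simp only [pvLoop1, if_neg hx, if_neg hy]
              rw [hstep]
              simp [pvSpec, hx, hy, Nat.succ_min_succ]

-- ===== VERDICT (by name: the statement is the Claim_ definition above) =====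
theorem lesDeuxListes_spec : Claim_equal_lesDeuxListes := by
  intro alpha bravo _
  unfold Spec_lesDeuxListes lesDeuxListes lesDeuxListes_alt
  simpa [pvSpec] using pvLoop1_invariant alpha bravo []
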